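-- pv_equiv track=rewrite | github.com/antoineprudhomme5/hackerrank | contests/week35/lucky-purchase.py | match_criteria
-- ===== SOURCE A (Python) =====
-- def match_criteria(s):
--     d = {'7': 0, '4': 0}
--     for c in s:
--         if c is '7' or c is '4':
--             d[c] += 1
--         else:
--             return False
--
--     return d['7'] == d['4']
-- ===== SOURCE B (Python) =====
-- def match_criteria(s):
--     # canonical-form check: a valid string must be an anagram of '4'*k + '7'*k,
--     # so sort it and compare with that canonical lucky string
--     half, rem = divmod(len(s), 2)
--     return rem == 0 and sorted(s) == ['4'] * half + ['7'] * half
-- ===== Notes on version B (the rewrite author's own statement) =====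
-- stated objective: alternative
-- what changed: A's early-exit counting loop with a dict is replaced by a canonical-form check: sort the string and compare it with '4'*(n/2) + '7'*(n/2), after checking the length is even.
import Mathlib
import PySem

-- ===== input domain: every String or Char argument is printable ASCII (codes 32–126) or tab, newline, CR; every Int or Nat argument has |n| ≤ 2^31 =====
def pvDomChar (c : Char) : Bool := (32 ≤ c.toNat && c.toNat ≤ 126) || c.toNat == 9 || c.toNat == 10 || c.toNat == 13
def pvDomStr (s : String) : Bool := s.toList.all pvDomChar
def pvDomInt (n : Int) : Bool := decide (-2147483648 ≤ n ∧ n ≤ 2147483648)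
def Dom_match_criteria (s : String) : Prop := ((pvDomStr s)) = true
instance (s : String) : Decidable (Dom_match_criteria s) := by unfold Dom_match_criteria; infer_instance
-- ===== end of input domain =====

-- B replaces A's early-exit counting loop by a sort-and-compare against the canonical lucky string (alternative algorithm).

-- ===== PORT A =====
-- A's loop over chars, carrying the counts d['7'] and d['4'], with early return False
def matchCriteriaLoop : List Char → Int → Int → Bool
  | [], n7, n4 => n7 == n4
  | c :: cs, n7, n4 =>
    if c == '7' then matchCriteriaLoop cs (n7 + 1) n4
    else if c == '4' then matchCriteriaLoop cs n7 (n4 + 1)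
    else false

def match_criteria (s : String) : Bool := matchCriteriaLoop s.toList 0 0

-- ===== PORT B =====
def match_criteria_alt (s : String) : Bool :=
  let n := s.toList.length
  let half := n / 2
  let rem := n % 2
  rem == 0 &&
    (PySem.List.sorted s.toList (fun x => x) false ==
      List.replicate half '4' ++ List.replicate half '7')

-- ===== PRECONDITION & SPEC =====
def Spec_match_criteria (s : String) (out : Bool) : Prop := out = match_criteria_alt s
instance (s : String) (out : Bool) : Decidable (Spec_match_criteria s out) := by unfold Spec_match_criteria; infer_instance

-- ===== CLAIM (what is proved, stated in full; the proofs are below) =====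
def Claim_equal_match_criteria : Prop := ∀ (s : String), Dom_match_criteria s → Spec_match_criteria s (match_criteria s)

-- ===== LEMMAS AND PROOFS =====

theorem matchCriteriaLoop_eq (l : List Char) (n7 n4 : Int) :
    matchCriteriaLoop l n7 n4 =
      (l.all (fun c => c == '4' || c == '7') &&
        ((n7 + (l.count '7' : Int)) == (n4 + (l.count '4' : Int)))) := by
  induction l generalizing n7 n4 with
  | nil => simp [matchCriteriaLoop]
  | cons c cs ih =>
    by_cases h7 : c = '7'
    · subst h7
      simp [matchCriteriaLoop, ih]
      congr 2
      ring
    · by_cases h4 : c = '4'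
      · subst h4
        simp [matchCriteriaLoop, h7, ih]
        congr 2
        ring
      · simp [matchCriteriaLoop, h7, h4, List.all_cons]

-- the canonical lucky list is ordered
theorem canon_pairwise (k : Nat) :
    (List.replicate k '4' ++ List.replicate k '7').Pairwise (· ≤ ·) := by
  apply List.pairwise_append.mpr
  refine ⟨List.pairwise_replicate.mpr (by simp), List.pairwise_replicate.mpr (by simp), ?_⟩
  intro a ha b hb
  rw [List.eq_of_mem_replicate ha, List.eq_of_mem_replicate hb]
  decide

-- a list is a permutation of the canonical lucky list iff every char is 4/7 and the counts are k each
theorem perm_canon_iff (l : List Char) (k : Nat) :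
    l.Perm (List.replicate k '4' ++ List.replicate k '7') ↔
      ((∀ c ∈ l, c = '4' ∨ c = '7') ∧ l.count '4' = k ∧ l.count '7' = k) := by
  constructor
  · intro hp
    refine ⟨?_, ?_, ?_⟩
    · intro c hc
      have := hp.mem_iff.mp hc
      simp at this
      rcases this with ⟨_, h⟩ | ⟨_, h⟩
      · exact Or.inl h
      · exact Or.inr h
    · rw [hp.count_eq]; simp [List.count_replicate]
    · rw [hp.count_eq]; simp [List.count_replicate]
  · rintro ⟨hmem, h4, h7⟩
    rw [List.perm_iff_count]
    intro c
    by_cases hc4 : c = '4'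
    · subst hc4; simp [List.count_replicate, h4]
    · by_cases hc7 : c = '7'
      · subst hc7; simp [List.count_replicate, h7]
      · have : l.count c = 0 := by
          rw [List.count_eq_zero]
          intro hc
          rcases hmem c hc with rfl | rfl <;> simp_all
        simp [this, List.count_replicate]
        rw [if_neg (fun h => hc4 h.symm), if_neg (fun h => hc7 h.symm)]

theorem sorted_eq_canon_iff (l : List Char) (k : Nat) :
    (PySem.List.sorted l (fun x => x) false =
        List.replicate k '4' ++ List.replicate k '7') ↔
      l.Perm (List.replicate k '4' ++ List.replicate k '7') := by
  constructor
  · intro h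
    have hp := PySem.List.sorted_perm l (fun x => x) false
    rw [h] at hp
    exact hp.symm
  · intro hp
    exact PySem.List.sorted_id_eq_of_perm_of_pairwise l _ hp.symm (canon_pairwise k)

-- length bookkeeping: counts determine the length when all chars are 4/7
theorem length_eq_counts (l : List Char) (h : ∀ c ∈ l, c = '4' ∨ c = '7') :
    l.length = l.count '4' + l.count '7' := by
  induction l with
  | nil => simp
  | cons c cs ih =>
    have hc := h c (by simp)
    have ih' := ih (fun c hc => h c (by simp [hc]))
    rcases hc with rfl | rfl <;>
      simp [ih'] <;> omega

-- ===== VERDICT (by name: the statement is the Claim_ definition above) =====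
theorem match_criteria_spec : Claim_equal_match_criteria := by
  intro s _
  unfold Spec_match_criteria match_criteria match_criteria_alt
  set l := s.toList with hl
  rw [matchCriteriaLoop_eq]
  simp only []
  rw [Bool.eq_iff_iff]
  simp only [Bool.and_eq_true, List.all_eq_true, beq_iff_eq, Bool.or_eq_true]
  constructor
  · rintro ⟨hmem, hcnt⟩
    have hmem' : ∀ c ∈ l, c = '4' ∨ c = '7' := by
      intro c hc
      rcases hmem c hc with h | h <;> simp_all
    have hcnt' : l.count '4' = l.count '7' := by
      have := hcnt
      simp at this
      omega
    have hlen := length_eq_counts l hmem'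
    refine ⟨?_, ?_⟩
    · omega
    · rw [sorted_eq_canon_iff, perm_canon_iff]
      exact ⟨hmem', by omega, by omega⟩
  · rintro ⟨hrem, hsorted⟩
    rw [sorted_eq_canon_iff, perm_canon_iff] at hsorted
    obtain ⟨hmem, h4, h7⟩ := hsorted
    refine ⟨?_, ?_⟩
    · intro c hc
      rcases hmem c hc with rfl | rfl <;> simp
    · simp
      omega
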